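-- pv_equiv track=rewrite | github.com/zhouchanghai/problem_ans | codility/2018Krypton.py | solution
-- ===== SOURCE A (Python) =====
-- def solution(A):
--     n = len(A)
--     hasZero = any(x==0 for row in A for x in row)
--     previous = None
--     for row in A:
--         if not previous:
--             previous = []
--             for x in row:
--                 c2 = getCount(x,2)
--                 c5 = getCount(x,5)
--                 if not previous:
--                     previous.append((c2,c5))
--                 else:
--                     left2, left5 = previous[-1]
--                     previous.append((c2 + left2, c5 + left5))
--             continue
--
--         current = []
--         for i, x in enumerate(row):
--             up = previous[i]
--             c2 = getCount(x,2)
--             c5 = getCount(x,5)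
--             if i == 0:
--                 current.append((c2+up[0], c5+up[1]))
--             else:
--                 left = current[-1]
--                 c2 += min(left[0], up[0])
--                 c5 += min(left[1], up[1])
--                 current.append((c2,c5))
--         previous = current
--
--     result = min(previous[-1])
--     if hasZero:
--         result = min(1, result)
--     return result
--
-- def getCount(x, p):
--     if x == 0:
--         return 1
--     rt = 0
--     while x%p == 0:
--         rt += 1
--         x //= p
--     return rt
-- ===== SOURCE B (Python) =====
-- def solution(A):
--     def count(x, p):
--         # multiplicity of prime p in x, with the cost convention count(0, p) = 1
--         if x == 0:
--             return 1
--         c = 0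
--         while x % p == 0:
--             c += 1
--             x //= p
--         return c
--
--     def best(p):
--         # top-down memoized recursion: cheapest right/down path from (0,0) to (i,j)
--         memo = {}
--         def go(i, j):
--             if (i, j) not in memo:
--                 w = count(A[i][j], p)
--                 if i == 0 and j == 0:
--                     v = w
--                 elif i == 0:
--                     v = w + go(0, j - 1)
--                 elif j == 0:
--                     v = w + go(i - 1, 0)
--                 else:
--                     v = w + min(go(i - 1, j), go(i, j - 1))
--                 memo[(i, j)] = v
--             return memo[(i, j)]
--         return go(len(A) - 1, len(A[0]) - 1)
--
--     result = min(best(2), best(5))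
--     if any(x == 0 for row in A for x in row):
--         result = min(1, result)
--     return result
-- ===== Notes on version B (the rewrite author's own statement) =====
-- stated objective: alternative
-- what changed: Replaces A's iterative bottom-up row-by-row DP (threading (count2,count5) tuples through explicit previous/current row lists) by a top-down memoized recursion go(i,j) over cell coordinates with a dict memo, run once per prime; the two scalar answers are combined with a final min.
-- outside the precondition, e.g. on solution([[2], [], [4]]): A returns 0, B raises IndexError; on solution([[10, 20], [10]]): A returns 2, B raises IndexError
import Mathlib
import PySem

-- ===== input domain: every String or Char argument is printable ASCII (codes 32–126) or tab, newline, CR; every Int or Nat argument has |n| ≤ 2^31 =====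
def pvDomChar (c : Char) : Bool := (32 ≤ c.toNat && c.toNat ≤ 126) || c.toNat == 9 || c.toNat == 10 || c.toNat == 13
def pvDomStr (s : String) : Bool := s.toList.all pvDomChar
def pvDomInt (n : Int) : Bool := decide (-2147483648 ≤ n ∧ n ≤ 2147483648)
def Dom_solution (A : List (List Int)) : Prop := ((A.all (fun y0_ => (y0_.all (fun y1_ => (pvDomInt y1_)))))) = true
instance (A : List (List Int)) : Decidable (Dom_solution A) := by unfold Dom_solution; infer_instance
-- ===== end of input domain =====

-- B replaces A's iterative bottom-up row-by-row tuple DP by a top-down memoized recursion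
-- over cell coordinates with a dict memo, run once per prime; alternative decomposition,
-- same asymptotic cost.

-- ===== PORT A =====
-- while x % p == 0: rt += 1; x //= p   (fuel x.natAbs bounds the iteration count; exact)
def gcLoop : Nat → Int → Int → Int → Int
  | 0, rt, _, _ => rt
  | fuel + 1, rt, x, p =>
      if PySem.Int.mod x p = 0 then gcLoop fuel (rt + 1) (PySem.Int.floordiv x p) p else rt

def getCountA (x p : Int) : Int :=
  if x = 0 then 1 else gcLoop x.natAbs 0 x p

-- first-row loop body of A (previous is empty / being built)
def stepFirstA (prev : List (Int × Int)) (x : Int) : List (Int × Int) :=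
  let c2 := getCountA x 2
  let c5 := getCountA x 5
  if prev = [] then prev ++ [(c2, c5)]
  else
    let l := PySem.List.pyGetD prev (-1) ((0 : Int), (0 : Int))
    prev ++ [(c2 + l.1, c5 + l.2)]

-- later-row loop body of A ('for i, x in enumerate(row)' with counter i in the state)
def stepNextA (previous : List (Int × Int)) (st : Int × List (Int × Int)) (x : Int) :
    Int × List (Int × Int) :=
  let i := st.1
  let current := st.2
  let up := PySem.List.pyGetD previous i ((0 : Int), (0 : Int))
  let c2 := getCountA x 2
  let c5 := getCountA x 5
  if i = 0 then (i + 1, current ++ [(c2 + up.1, c5 + up.2)])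
  else
    let left := PySem.List.pyGetD current (-1) ((0 : Int), (0 : Int))
    (i + 1, current ++ [(c2 + min left.1 up.1, c5 + min left.2 up.2)])

def rowA (previous : List (Int × Int)) (row : List Int) : List (Int × Int) :=
  if previous = [] then row.foldl stepFirstA []
  else (row.foldl (stepNextA previous) ((0 : Int), ([] : List (Int × Int)))).2

def solution (A : List (List Int)) : Int :=
  let hasZero := A.any (fun row => row.any (fun x => x == 0))
  let previous := A.foldl rowA ([] : List (Int × Int))
  let lastPair := PySem.List.pyGetD previous (-1) ((0 : Int), (0 : Int))
  let result := min lastPair.1 lastPair.2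
  if hasZero then min 1 result else result

-- ===== PORT B =====
-- B's local 'count' (same convention count(0,p)=1; fuel x.natAbs bounds the iterations; exact)
def cbLoop : Nat → Int → Int → Int → Int
  | 0, c, _, _ => c
  | fuel + 1, c, x, p =>
      if PySem.Int.mod x p = 0 then cbLoop fuel (c + 1) (PySem.Int.floordiv x p) p else c

def countB (x p : Int) : Int :=
  if x = 0 then 1 else cbLoop x.natAbs 0 x p

-- B's memoized recursion go(i, j): value plus the updated memo (indices are nonnegative
-- throughout, so they are Nat here; A[i][j] is in range on every admitted input)
def goB (A : List (List Int)) (p : Int) (i j : Nat) (memo : PySem.Dict (Nat × Nat) Int) :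
    Int × PySem.Dict (Nat × Nat) Int :=
  match memo.get? (i, j) with
  | some v => (v, memo)
  | none =>
    let w := countB ((A.getD i []).getD j 0) p
    let r : Int × PySem.Dict (Nat × Nat) Int :=
      match i, j with
      | 0, 0 => (w, memo)
      | 0, j' + 1 => let t := goB A p 0 j' memo; (w + t.1, t.2)
      | i' + 1, 0 => let t := goB A p i' 0 memo; (w + t.1, t.2)
      | i' + 1, j' + 1 =>
          let t1 := goB A p i' (j' + 1) memo
          let t2 := goB A p (i' + 1) j' t1.2
          (w + min t1.1 t2.1, t2.2)
    (r.1, r.2.insert (i, j) r.1)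
termination_by (i, j)

def bestB (A : List (List Int)) (p : Int) : Int :=
  (goB A p (A.length - 1) ((A.headD []).length - 1) PySem.Dict.empty).1

def solution_alt (A : List (List Int)) : Int :=
  let result := min (bestB A 2) (bestB A 5)
  if A.any (fun row => row.any (fun x => x == 0)) then min 1 result else result

-- ===== PRECONDITION & SPEC =====
-- Pre_ excludes empty and non-rectangular grids (empty matrix, empty rows, rows of unequal
-- length): there A raises (TypeError/IndexError) or returns an accidental value of leftover
-- loop state (an empty row resets the DP, a shorter row silently truncates the grid).
def Pre_solution (A : List (List Int)) : Prop :=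
  A ≠ [] ∧ A.headD [] ≠ [] ∧ ∀ row ∈ A, row.length = (A.headD []).length

instance (A : List (List Int)) : Decidable (Pre_solution A) := by
  unfold Pre_solution; infer_instance

def pvWitness_solution : List (List Int) := [[2, 5], [10, 4]]

def Spec_solution (A : List (List Int)) (out : Int) : Prop := out = solution_alt A
instance (A : List (List Int)) (out : Int) : Decidable (Spec_solution A out) := by
  unfold Spec_solution; infer_instance

-- ===== CLAIM (what is proved, stated in full; the proofs are below) =====
def Claim_equal_solution : Prop :=
  ∀ (A : List (List Int)), Dom_solution A → Pre_solution A → Spec_solution A (solution A)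

-- ===== LEMMAS AND PROOFS =====

theorem cbLoop_eq_gcLoop (f : Nat) : ∀ c x p, cbLoop f c x p = gcLoop f c x p := by
  induction f with
  | zero => intro c x p; rfl
  | succ f ih => intro c x p; simp [cbLoop, gcLoop]; split_ifs <;> simp [ih]

theorem countB_eq_getCountA (x p : Int) : countB x p = getCountA x p := by
  simp [countB, getCountA, cbLoop_eq_gcLoop]

-- the weight of cell (i, j) and the pure min-path-cost table both programs compute
def W (A : List (List Int)) (p : Int) (i j : Nat) : Int :=
  getCountA ((A.getD i []).getD j 0) p

def gSpec (A : List (List Int)) (p : Int) : Nat → Nat → Int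
  | 0, 0 => W A p 0 0
  | 0, j + 1 => W A p 0 (j + 1) + gSpec A p 0 j
  | i + 1, 0 => W A p (i + 1) 0 + gSpec A p i 0
  | i + 1, j + 1 => W A p (i + 1) (j + 1) + min (gSpec A p i (j + 1)) (gSpec A p (i + 1) j)

-- every value stored in the memo is the correct table value
def GoodMemo (A : List (List Int)) (p : Int) (memo : PySem.Dict (Nat × Nat) Int) : Prop :=
  ∀ i j v, memo.get? (i, j) = some v → v = gSpec A p i j

theorem goodMemo_insert (A : List (List Int)) (p : Int) (memo : PySem.Dict (Nat × Nat) Int)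
    (i j : Nat) (v : Int) (hg : GoodMemo A p memo) (hv : v = gSpec A p i j) :
    GoodMemo A p (memo.insert (i, j) v) := by
  intro i' j' v' h
  rw [PySem.Dict.get?_insert] at h
  split_ifs at h with he
  · obtain ⟨h1, h2⟩ := Prod.mk.injEq .. ▸ he
    injection h with h3
    subst h1; subst h2; omega
  · exact hg i' j' v' h

theorem goB_some (A : List (List Int)) (p : Int) (i j : Nat) (memo : PySem.Dict (Nat × Nat) Int)
    (v : Int) (h : memo.get? (i, j) = some v) : goB A p i j memo = (v, memo) := by
  rw [goB.eq_def, h]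

theorem goB_none_00 (A : List (List Int)) (p : Int) (memo : PySem.Dict (Nat × Nat) Int)
    (h : memo.get? ((0 : Nat), (0 : Nat)) = none) :
    goB A p 0 0 memo = (countB ((A.getD 0 []).getD 0 0) p,
      memo.insert (0, 0) (countB ((A.getD 0 []).getD 0 0) p)) := by
  rw [goB.eq_def, h]

theorem goB_none_0s (A : List (List Int)) (p : Int) (j' : Nat) (memo : PySem.Dict (Nat × Nat) Int)
    (h : memo.get? ((0 : Nat), j' + 1) = none) :
    goB A p 0 (j' + 1) memo =
      (countB ((A.getD 0 []).getD (j' + 1) 0) p + (goB A p 0 j' memo).1,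
       ((goB A p 0 j' memo).2).insert (0, j' + 1)
         (countB ((A.getD 0 []).getD (j' + 1) 0) p + (goB A p 0 j' memo).1)) := by
  rw [goB.eq_def, h]

theorem goB_none_s0 (A : List (List Int)) (p : Int) (i' : Nat) (memo : PySem.Dict (Nat × Nat) Int)
    (h : memo.get? (i' + 1, (0 : Nat)) = none) :
    goB A p (i' + 1) 0 memo =
      (countB ((A.getD (i' + 1) []).getD 0 0) p + (goB A p i' 0 memo).1,
       ((goB A p i' 0 memo).2).insert (i' + 1, 0)
         (countB ((A.getD (i' + 1) []).getD 0 0) p + (goB A p i' 0 memo).1)) := by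
  rw [goB.eq_def, h]

theorem goB_none_ss (A : List (List Int)) (p : Int) (i' j' : Nat) (memo : PySem.Dict (Nat × Nat) Int)
    (h : memo.get? (i' + 1, j' + 1) = none) :
    goB A p (i' + 1) (j' + 1) memo =
      (countB ((A.getD (i' + 1) []).getD (j' + 1) 0) p
         + min (goB A p i' (j' + 1) memo).1 (goB A p (i' + 1) j' (goB A p i' (j' + 1) memo).2).1,
       ((goB A p (i' + 1) j' (goB A p i' (j' + 1) memo).2).2).insert (i' + 1, j' + 1)
         (countB ((A.getD (i' + 1) []).getD (j' + 1) 0) p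
           + min (goB A p i' (j' + 1) memo).1 (goB A p (i' + 1) j' (goB A p i' (j' + 1) memo).2).1)) := by
  rw [goB.eq_def, h]

theorem goB_ok (A : List (List Int)) (p : Int) : ∀ (N i j : Nat)
    (memo : PySem.Dict (Nat × Nat) Int), i + j ≤ N → GoodMemo A p memo →
    (goB A p i j memo).1 = gSpec A p i j ∧ GoodMemo A p (goB A p i j memo).2 := by
  intro N
  induction N with
  | zero =>
      intro i j memo hle hg
      have hi : i = 0 := by omega
      have hj : j = 0 := by omega
      subst hi; subst hj
      cases hm : memo.get? ((0 : Nat), (0 : Nat)) with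
      | some v => rw [goB_some A p 0 0 memo v hm]; exact ⟨hg 0 0 v hm, hg⟩
      | none =>
          rw [goB_none_00 A p memo hm]
          exact ⟨by simp [countB_eq_getCountA, gSpec, W],
            goodMemo_insert A p memo 0 0 _ hg (by simp [countB_eq_getCountA, gSpec, W])⟩
  | succ N ih =>
      intro i j memo hle hg
      cases hm : memo.get? ((i : Nat), (j : Nat)) with
      | some v => rw [goB_some A p i j memo v hm]; exact ⟨hg i j v hm, hg⟩
      | none =>
          match i, j with
          | 0, 0 =>
              rw [goB_none_00 A p memo hm]
              exact ⟨by simp [countB_eq_getCountA, gSpec, W],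
                goodMemo_insert A p memo 0 0 _ hg (by simp [countB_eq_getCountA, gSpec, W])⟩
          | 0, j' + 1 =>
              obtain ⟨h1, h2⟩ := ih 0 j' memo (by omega) hg
              rw [goB_none_0s A p j' memo hm]
              have hv : countB ((A.getD 0 []).getD (j' + 1) 0) p + (goB A p 0 j' memo).1
                  = gSpec A p 0 (j' + 1) := by
                rw [h1]; simp [countB_eq_getCountA, gSpec, W]
              exact ⟨hv, goodMemo_insert A p _ 0 (j' + 1) _ h2 hv⟩
          | i' + 1, 0 =>
              obtain ⟨h1, h2⟩ := ih i' 0 memo (by omega) hg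
              rw [goB_none_s0 A p i' memo hm]
              have hv : countB ((A.getD (i' + 1) []).getD 0 0) p + (goB A p i' 0 memo).1
                  = gSpec A p (i' + 1) 0 := by
                rw [h1]; simp [countB_eq_getCountA, gSpec, W]
              exact ⟨hv, goodMemo_insert A p _ (i' + 1) 0 _ h2 hv⟩
          | i' + 1, j' + 1 =>
              obtain ⟨h1, h2⟩ := ih i' (j' + 1) memo (by omega) hg
              obtain ⟨h3, h4⟩ := ih (i' + 1) j' _ (by omega) h2
              rw [goB_none_ss A p i' j' memo hm]
              have hv : countB ((A.getD (i' + 1) []).getD (j' + 1) 0) p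
                    + min (goB A p i' (j' + 1) memo).1
                        (goB A p (i' + 1) j' (goB A p i' (j' + 1) memo).2).1
                  = gSpec A p (i' + 1) (j' + 1) := by
                rw [h1, h3]; simp [countB_eq_getCountA, gSpec, W]
              exact ⟨hv, goodMemo_insert A p _ (i' + 1) (j' + 1) _ h4 hv⟩

theorem goodMemo_empty (A : List (List Int)) (p : Int) :
    GoodMemo A p (PySem.Dict.empty : PySem.Dict (Nat × Nat) Int) := by
  intro i j v h
  simp [PySem.Dict.get?_empty] at h

theorem bestB_eq_gSpec (A : List (List Int)) (p : Int) :
    bestB A p = gSpec A p (A.length - 1) ((A.headD []).length - 1) :=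
  (goB_ok A p _ _ _ _ le_rfl (goodMemo_empty A p)).1

-- ===== A-side: the fold-based row DP computes the same table =====
-- scalar specs (the shape of A's per-row computations)
def cum : Int → List Int → List Int
  | _, [] => []
  | s, x :: xs => (s + x) :: cum (s + x) xs

def relaxS : Int → List Int → List Int → List Int
  | c, p :: ps, x :: xs => (x + min p c) :: relaxS (x + min p c) ps xs
  | _, _, _ => []

def nextS (dp row : List Int) : List Int :=
  match dp, row with
  | p :: ps, x :: xs => (x + p) :: relaxS (x + p) ps xs
  | _, _ => []

-- pair specs (the shape of A's per-row computations)
def cumP : Int × Int → List Int → List (Int × Int)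
  | _, [] => []
  | c, x :: xs =>
      (getCountA x 2 + c.1, getCountA x 5 + c.2) ::
        cumP (getCountA x 2 + c.1, getCountA x 5 + c.2) xs

def firstP : List Int → List (Int × Int)
  | [] => []
  | x :: xs => (getCountA x 2, getCountA x 5) :: cumP (getCountA x 2, getCountA x 5) xs

def relaxP : Int × Int → List (Int × Int) → List Int → List (Int × Int)
  | c, u :: us, x :: xs =>
      (getCountA x 2 + min c.1 u.1, getCountA x 5 + min c.2 u.2) ::
        relaxP (getCountA x 2 + min c.1 u.1, getCountA x 5 + min c.2 u.2) us xs
  | _, _, _ => []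

def nextP (prev : List (Int × Int)) (row : List Int) : List (Int × Int) :=
  match prev, row with
  | u :: us, x :: xs =>
      (getCountA x 2 + u.1, getCountA x 5 + u.2) ::
        relaxP (getCountA x 2 + u.1, getCountA x 5 + u.2) us xs
  | _, _ => []

theorem cum_length (xs : List Int) : ∀ s, (cum s xs).length = xs.length := by
  induction xs with
  | nil => intro s; rfl
  | cons x xs ih => intro s; simp [cum, ih]

theorem relaxS_length (xs : List Int) :
    ∀ c ps, ps.length = xs.length → (relaxS c ps xs).length = xs.length := by
  induction xs with
  | nil => intro c ps h; cases ps <;> simp [relaxS]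
  | cons x xs ih =>
      intro c ps h
      cases ps with
      | nil => simp at h
      | cons p ps => simp only [relaxS, List.length_cons]; rw [ih _ _ (by simpa using h)]

theorem nextS_length (dp row : List Int) (h : dp.length = row.length) :
    (nextS dp row).length = row.length := by
  cases dp with
  | nil => cases row with
    | nil => rfl
    | cons x xs => simp at h
  | cons p ps =>
      cases row with
      | nil => simp at h
      | cons x xs =>
          simp only [nextS, List.length_cons]
          rw [relaxS_length _ _ _ (by simpa using h)]

theorem getD_drop_cons {α : Type} (l : List α) : ∀ (k : Nat) (u : α) (us : List α) (d : α),
    l.drop k = u :: us → l.getD k d = u := by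
  induction l with
  | nil => intro k u us d h; simp at h
  | cons a l ih =>
      intro k u us d h
      cases k with
      | zero => simp at h; simp [h.1]
      | succ k => simp only [List.drop_succ_cons] at h; simpa using ih k u us d h

-- A's first-row fold builds firstP
theorem foldFirstA (xs : List Int) : ∀ (prev : List (Int × Int)) (a : Int × Int),
    prev ≠ [] → PySem.List.pyGetD prev (-1) ((0:Int),(0:Int)) = a →
    xs.foldl stepFirstA prev = prev ++ cumP a xs := by
  induction xs with
  | nil => intro prev a h1 h2; simp [cumP]
  | cons x xs ih =>
      intro prev a h1 h2
      simp only [List.foldl_cons, cumP]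
      have hstep : stepFirstA prev x
          = prev ++ [(getCountA x 2 + a.1, getCountA x 5 + a.2)] := by
        simp [stepFirstA, h1, h2]
      rw [hstep, ih (prev ++ [(getCountA x 2 + a.1, getCountA x 5 + a.2)])
            (getCountA x 2 + a.1, getCountA x 5 + a.2) (by simp)
            (PySem.List.pyGetD_neg_one_append_singleton _ _ _)]
      simp

theorem foldFirstA_entry (row : List Int) (h : row ≠ []) :
    row.foldl stepFirstA [] = firstP row := by
  cases row with
  | nil => simp at h
  | cons x xs =>
      simp only [List.foldl_cons, firstP]
      have hstep : stepFirstA [] x = [(getCountA x 2, getCountA x 5)] := by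
        simp [stepFirstA]
      rw [hstep]
      have := foldFirstA xs [(getCountA x 2, getCountA x 5)]
          (getCountA x 2, getCountA x 5) (by simp)
          (PySem.List.pyGetD_neg_one_append_singleton [] _ _)
      simpa using this

-- A's later-row fold builds relaxP / nextP
theorem foldNextA (previous : List (Int × Int)) (xs : List Int) :
    ∀ (k : Nat) (cur : List (Int × Int)) (a : Int × Int) (ups : List (Int × Int)),
    previous.drop k = ups → xs.length ≤ ups.length → 1 ≤ k → cur ≠ [] →
    PySem.List.pyGetD cur (-1) ((0:Int),(0:Int)) = a →
    (xs.foldl (stepNextA previous) ((k : Int), cur)).2 = cur ++ relaxP a ups xs := by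
  induction xs with
  | nil => intro k cur a ups h1 h2 h3 h4 h5; cases ups <;> simp [relaxP]
  | cons x xs ih =>
      intro k cur a ups h1 h2 h3 h4 h5
      cases ups with
      | nil => simp at h2
      | cons u us =>
          simp only [List.foldl_cons]
          have hi0 : ¬ ((k : Int) = 0) := by omega
          have hup : PySem.List.pyGetD previous ((k : Int)) ((0:Int),(0:Int)) = u := by
            rw [PySem.List.pyGetD_natCast]
            exact getD_drop_cons previous k u us _ h1
          have hstep : stepNextA previous ((k : Int), cur) x
              = ((k : Int) + 1,
                 cur ++ [(getCountA x 2 + min a.1 u.1, getCountA x 5 + min a.2 u.2)]) := by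
            simp only [stepNextA, hi0, if_false, hup, h5]
          rw [hstep]
          have hcast : ((k : Int) + 1) = ((k + 1 : Nat) : Int) := by push_cast; ring
          rw [hcast]
          have hdrop : previous.drop (k + 1) = us := by
            have h := (List.tail_drop (l := previous) (i := k)).symm
            rw [h, h1]
            rfl
          rw [ih (k + 1) (cur ++ [(getCountA x 2 + min a.1 u.1, getCountA x 5 + min a.2 u.2)])
                (getCountA x 2 + min a.1 u.1, getCountA x 5 + min a.2 u.2) us hdrop
                (by simpa using h2) (by omega) (by simp)
                (PySem.List.pyGetD_neg_one_append_singleton _ _ _)]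
          simp [relaxP]

theorem foldNextA_entry (previous : List (Int × Int)) (row : List Int)
    (hne : previous ≠ []) (hlen : row.length ≤ previous.length) :
    (row.foldl (stepNextA previous) ((0 : Int), ([] : List (Int × Int)))).2
      = nextP previous row := by
  cases row with
  | nil => cases previous <;> simp [nextP]
  | cons x xs =>
      cases previous with
      | nil => exact absurd rfl hne
      | cons u us =>
          simp only [List.foldl_cons]
          have hstep : stepNextA (u :: us) ((0 : Int), ([] : List (Int × Int))) x
              = ((0 : Int) + 1, [(getCountA x 2 + u.1, getCountA x 5 + u.2)]) := by
            simp [stepNextA, PySem.List.pyGetD_zero_cons]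
          rw [hstep]
          have hcast : ((0 : Int) + 1) = ((1 : Nat) : Int) := by norm_num
          rw [hcast]
          have := foldNextA (u :: us) xs 1 [(getCountA x 2 + u.1, getCountA x 5 + u.2)]
              (getCountA x 2 + u.1, getCountA x 5 + u.2) us rfl
              (by simpa using hlen) (by omega) (by simp)
              (PySem.List.pyGetD_neg_one_append_singleton [] _ _)
          rw [this]
          simp [nextP]

-- pair specs are zips of scalar specs
theorem cumP_zip (xs : List Int) : ∀ (a b : Int),
    cumP (a, b) xs
      = (cum a (xs.map (fun x => getCountA x 2))).zip (cum b (xs.map (fun x => getCountA x 5))) := by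
  induction xs with
  | nil => intro a b; simp [cumP, cum]
  | cons x xs ih =>
      intro a b
      simp only [cumP, List.map_cons, cum, List.zip_cons_cons]
      rw [Int.add_comm a (getCountA x 2), Int.add_comm b (getCountA x 5)]
      rw [ih]

theorem firstP_zip (row : List Int) :
    firstP row
      = (cum 0 (row.map (fun x => getCountA x 2))).zip (cum 0 (row.map (fun x => getCountA x 5))) := by
  cases row with
  | nil => simp [firstP, cum]
  | cons x xs =>
      simp only [firstP, List.map_cons, cum, List.zip_cons_cons, Int.zero_add]
      rw [cumP_zip]

theorem relaxP_zip (xs : List Int) : ∀ (us : List (Int × Int)) (a b : Int),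
    us.length = xs.length →
    relaxP (a, b) us xs
      = (relaxS a (us.map Prod.fst) (xs.map (fun x => getCountA x 2))).zip
          (relaxS b (us.map Prod.snd) (xs.map (fun x => getCountA x 5))) := by
  induction xs with
  | nil => intro us a b h; cases us <;> simp [relaxP, relaxS]
  | cons x xs ih =>
      intro us a b h
      cases us with
      | nil => simp at h
      | cons u us =>
          simp only [relaxP, List.map_cons, relaxS, List.zip_cons_cons]
          rw [min_comm u.1 a, min_comm u.2 b]
          rw [ih _ _ _ (by simpa using h)]

theorem nextP_zip (prev : List (Int × Int)) (row : List Int) (h : prev.length = row.length) :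
    nextP prev row
      = (nextS (prev.map Prod.fst) (row.map (fun x => getCountA x 2))).zip
          (nextS (prev.map Prod.snd) (row.map (fun x => getCountA x 5))) := by
  cases prev with
  | nil => cases row <;> simp [nextP, nextS]
  | cons u us =>
      cases row with
      | nil => simp at h
      | cons x xs =>
          simp only [nextP, List.map_cons, nextS, List.zip_cons_cons]
          rw [relaxP_zip _ _ _ _ (by simpa using h)]

theorem pyGetD_neg_one_getLastD {α : Type} (xs : List α) (d : α) :
    PySem.List.pyGetD xs (-1) d = xs.getLastD d := by
  cases xs with
  | nil => simp [PySem.List.pyGetD, PySem.List.pyGet?]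
  | cons a l =>
      rw [PySem.List.pyGetD_neg_one _ _ (by simp)]
      rw [List.getLastD_eq_getLast?, List.getLast?_eq_some_getLast (by simp)]
      rfl

theorem getLastD_zip (d2 : List Int) : ∀ (d5 : List Int), d2.length = d5.length →
    ∀ (p q : Int),
    (d2.zip d5).getLastD (p, q) = (d2.getLastD p, d5.getLastD q) := by
  induction d2 with
  | nil =>
      intro d5 h p q
      cases d5 with
      | nil => simp
      | cons y ys => simp at h
  | cons x xs ih =>
      intro d5 h p q
      cases d5 with
      | nil => simp at h
      | cons y ys =>
          simp only [List.zip_cons_cons, List.getLastD_cons]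
          exact ih ys (by simpa using h) x y

theorem zip_getLastD (d2 d5 : List Int) (h : d2.length = d5.length) :
    PySem.List.pyGetD (d2.zip d5) (-1) ((0:Int),(0:Int))
      = (PySem.List.pyGetD d2 (-1) 0, PySem.List.pyGetD d5 (-1) 0) := by
  rw [pyGetD_neg_one_getLastD, pyGetD_neg_one_getLastD, pyGetD_neg_one_getLastD]
  exact getLastD_zip d2 d5 h _ _

theorem foldNextS_length (g : Int → Int) (rows : List (List Int)) :
    ∀ (d : List Int), (∀ row ∈ rows, row.length = d.length) →
    (rows.foldl (fun dp row => nextS dp (row.map g)) d).length = d.length := by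
  induction rows with
  | nil => intro d h; rfl
  | cons row rows ih =>
      intro d h
      simp only [List.foldl_cons]
      have hlen : (nextS d (row.map g)).length = d.length := by
        rw [nextS_length _ _ (by simp [h row (by simp)])]
        simp [h row (by simp)]
      rw [ih _ (by intro r hr; rw [h r (by simp [hr]), ← hlen]), hlen]

-- main row-by-row invariant
theorem mainFold (rows : List (List Int)) : ∀ (d2 d5 : List Int),
    d2.length = d5.length → d2 ≠ [] → (∀ row ∈ rows, row.length = d2.length) →
    rows.foldl rowA (d2.zip d5)
      = (rows.foldl (fun dp row => nextS dp (row.map (fun x => getCountA x 2))) d2).zip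
          (rows.foldl (fun dp row => nextS dp (row.map (fun x => getCountA x 5))) d5) := by
  induction rows with
  | nil => intro d2 d5 h hne hr; simp
  | cons row rows ih =>
      intro d2 d5 h hne hr
      have hd2len : row.length = d2.length := hr row (by simp)
      have hzip_ne : d2.zip d5 ≠ [] := by
        simp only [ne_eq, List.zip_eq_nil_iff, not_or]
        exact ⟨hne, by intro h5; rw [h5] at h; simp at h; exact hne h⟩
      have hziplen : (d2.zip d5).length = d2.length := by simp [List.length_zip, h]
      simp only [List.foldl_cons]
      have hrowA : rowA (d2.zip d5) row = nextP (d2.zip d5) row := by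
        rw [rowA, if_neg hzip_ne]
        exact foldNextA_entry _ _ hzip_ne (by omega)
      rw [hrowA, nextP_zip _ _ (by omega),
          List.map_fst_zip (le_of_eq h), List.map_snd_zip (le_of_eq h.symm)]
      have hl2 : (nextS d2 (row.map (fun x => getCountA x 2))).length = row.length := by
        rw [nextS_length _ _ (by simp [hd2len])]; simp
      have hl5 : (nextS d5 (row.map (fun x => getCountA x 5))).length = row.length := by
        rw [nextS_length _ _ (by simp [hd2len, h])]; simp
      exact ih _ _ (by omega)
        (by
          have : 0 < row.length := by
            rw [hd2len]; exact List.length_pos_of_ne_nil hne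
          exact List.ne_nil_of_length_pos (by omega))
        (by intro r hr'; rw [hr r (by simp [hr']), ← hd2len, ← hl2])

-- ===== bridge: entries of the scalar folds are gSpec values =====

theorem relaxS_getD (xs : List Int) : ∀ (ps : List Int) (c : Int),
    ps.length = xs.length → ∀ j, j < xs.length →
    (relaxS c ps xs).getD j 0
      = xs.getD j 0 + min (ps.getD j 0) (if j = 0 then c else (relaxS c ps xs).getD (j - 1) 0) := by
  induction xs with
  | nil => intro ps c h j hj; exact absurd hj (by simp)
  | cons x xs ih =>
      intro ps c h j hj
      cases ps with
      | nil => simp at h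
      | cons p ps =>
          simp only [relaxS]
          cases j with
          | zero => simp
          | succ j =>
              simp only [List.getD_cons_succ, Nat.add_sub_cancel]
              rw [ih ps (x + min p c) (by simpa using h) j (by simpa using hj)]
              cases j with
              | zero => simp
              | succ j => simp

theorem nextS_getD (dp row : List Int) (hlen : dp.length = row.length) :
    ∀ j, j < row.length →
    (nextS dp row).getD j 0
      = row.getD j 0 + (if j = 0 then dp.getD 0 0
          else min (dp.getD j 0) ((nextS dp row).getD (j - 1) 0)) := by
  intro j hj
  cases dp with
  | nil => cases row with
    | nil => exact absurd hj (by simp)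
    | cons x xs => simp at hlen
  | cons p ps =>
      cases row with
      | nil => exact absurd hj (by simp)
      | cons x xs =>
          simp only [nextS]
          cases j with
          | zero => simp
          | succ j =>
              simp only [List.getD_cons_succ, Nat.add_sub_cancel]
              rw [relaxS_getD xs ps (x + p) (by simpa using hlen) j (by simpa using hj)]
              cases j with
              | zero => simp
              | succ j => simp

theorem cum_getD (xs : List Int) : ∀ (s : Int) (j : Nat), j < xs.length →
    (cum s xs).getD j 0
      = (if j = 0 then s else (cum s xs).getD (j - 1) 0) + xs.getD j 0 := by
  induction xs with
  | nil => intro s j hj; exact absurd hj (by simp)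
  | cons x xs ih =>
      intro s j hj
      simp only [cum]
      cases j with
      | zero => simp
      | succ j =>
          simp only [List.getD_cons_succ, Nat.add_sub_cancel]
          rw [ih (s + x) j (by simpa using hj)]
          cases j with
          | zero => simp
          | succ j => simp

theorem getD_map_weight (row : List Int) (p : Int) (j : Nat) (hj : j < row.length) :
    (row.map (fun x => getCountA x p)).getD j 0 = getCountA (row.getD j 0) p := by
  rw [List.getD_eq_getElem _ _ (by simpa using hj), List.getD_eq_getElem _ _ hj,
      List.getElem_map]

theorem getD_of_drop {α : Type} (A : List (List α)) (k : Nat) (row : List α)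
    (rows : List (List α)) (h : A.drop k = row :: rows) : A.getD k [] = row :=
  getD_drop_cons A k row rows [] h

-- first row of the table
theorem cum_gSpec (A : List (List Int)) (p : Int) (r0 : List Int)
    (h0 : A.getD 0 [] = r0) : ∀ j, j < r0.length →
    (cum 0 (r0.map (fun x => getCountA x p))).getD j 0 = gSpec A p 0 j := by
  intro j
  induction j with
  | zero =>
      intro hj
      rw [cum_getD _ _ _ (by simpa using hj)]
      simp only [reduceIte]
      rw [getD_map_weight r0 p 0 hj]
      simp only [gSpec, W, h0]
      ring
  | succ j ih =>
      intro hj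
      rw [cum_getD _ _ _ (by simpa using hj)]
      simp only [Nat.succ_ne_zero, if_false, Nat.add_sub_cancel]
      rw [ih (by omega), getD_map_weight r0 p (j + 1) hj]
      simp only [gSpec, W, h0]
      ring

-- one relaxation step advances the table one row
theorem nextRow_gSpec (A : List (List Int)) (p : Int) (i m : Nat) (d row : List Int)
    (hd : d.length = m) (hrow : row.length = m) (hrowA : A.getD (i + 1) [] = row)
    (hent : ∀ j, j < m → d.getD j 0 = gSpec A p i j) :
    ∀ j, j < m → (nextS d (row.map (fun x => getCountA x p))).getD j 0 = gSpec A p (i + 1) j := by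
  intro j
  induction j with
  | zero =>
      intro hj
      rw [nextS_getD _ _ (by simp [hd, hrow]) 0 (by simp [hrow]; omega)]
      simp only [reduceIte]
      rw [getD_map_weight row p 0 (by omega), hent 0 hj]
      simp only [gSpec, W, hrowA]
  | succ j ih =>
      intro hj
      rw [nextS_getD _ _ (by simp [hd, hrow]) (j + 1) (by simp [hrow]; omega)]
      simp only [Nat.succ_ne_zero, if_false, Nat.add_sub_cancel]
      rw [getD_map_weight row p (j + 1) (by omega), hent (j + 1) hj, ih (by omega)]
      simp only [gSpec, W, hrowA]

-- the whole fold reaches row i + rows.length of the table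
theorem fold_gSpec (A : List (List Int)) (p : Int) (m : Nat) :
    ∀ (rows : List (List Int)) (i : Nat) (d : List Int),
    A.drop (i + 1) = rows → d.length = m → (∀ row ∈ rows, row.length = m) →
    (∀ j, j < m → d.getD j 0 = gSpec A p i j) →
    ∀ j, j < m →
    (rows.foldl (fun dp row => nextS dp (row.map (fun x => getCountA x p))) d).getD j 0
      = gSpec A p (i + rows.length) j := by
  intro rows
  induction rows with
  | nil => intro i d _ _ _ hent j hj; simpa using hent j hj
  | cons row rows ih =>
      intro i d hdrop hd hr hent j hj
      simp only [List.foldl_cons]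
      have hrowm : row.length = m := hr row (by simp)
      have hrowA : A.getD (i + 1) [] = row := getD_of_drop A (i + 1) row rows hdrop
      have hd' : (nextS d (row.map (fun x => getCountA x p))).length = m := by
        rw [nextS_length _ _ (by simp [hd, hrowm])]; simp [hrowm]
      have hdrop' : A.drop (i + 1 + 1) = rows := by
        have h := (List.tail_drop (l := A) (i := i + 1)).symm
        rw [h, hdrop]
        rfl
      have := ih (i + 1) (nextS d (row.map (fun x => getCountA x p))) hdrop' hd'
          (by intro r hr'; exact hr r (by simp [hr']))
          (nextRow_gSpec A p i m d row hd hrowm hrowA hent) j hj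
      rw [this]
      congr 1
      simp
      omega

theorem pyGetD_neg_one_eq_getD (xs : List Int) (h : xs ≠ []) :
    PySem.List.pyGetD xs (-1) 0 = xs.getD (xs.length - 1) 0 := by
  rw [PySem.List.pyGetD_neg_one _ _ h, List.getLast_eq_getElem,
      List.getD_eq_getElem _ _ (by have := List.length_pos_of_ne_nil h; omega)]

-- the last entry of a scalar fold is the bottom-right table value
theorem foldScalar_last (A : List (List Int)) (p : Int) (r0 : List Int)
    (rest : List (List Int)) (hA : A = r0 :: rest) (hr0 : r0 ≠ [])
    (hlen : ∀ row ∈ rest, row.length = r0.length) :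
    PySem.List.pyGetD
        (rest.foldl (fun dp row => nextS dp (row.map (fun x => getCountA x p)))
          (cum 0 (r0.map (fun x => getCountA x p)))) (-1) 0
      = gSpec A p rest.length (r0.length - 1) := by
  have hm : 0 < r0.length := List.length_pos_of_ne_nil hr0
  have hclen : (cum 0 (r0.map (fun x => getCountA x p))).length = r0.length := by
    simp [cum_length]
  have hflen : (rest.foldl (fun dp row => nextS dp (row.map (fun x => getCountA x p)))
      (cum 0 (r0.map (fun x => getCountA x p)))).length = r0.length := by
    rw [foldNextS_length _ _ _ (by intro r hr; rw [hlen r hr, ← hclen]), hclen]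
  rw [pyGetD_neg_one_eq_getD _ (by
        apply List.ne_nil_of_length_pos
        omega), hflen]
  have := fold_gSpec A p r0.length rest 0 (cum 0 (r0.map (fun x => getCountA x p)))
      (by rw [hA]; rfl) hclen hlen
      (cum_gSpec A p r0 (by rw [hA]; rfl)) (r0.length - 1) (by omega)
  simpa using this

-- ===== VERDICT (by name: the statement is the Claim_ definition above) =====
theorem solution_spec : Claim_equal_solution := by
  unfold Claim_equal_solution
  intro A hdom hpre
  obtain ⟨hA0, hh0, hlen⟩ := hpre
  obtain ⟨r0, rest, rfl⟩ := List.exists_cons_of_ne_nil hA0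
  have hr0 : r0 ≠ [] := by simpa using hh0
  have hlen' : ∀ row ∈ rest, row.length = r0.length := by
    intro r hr; simpa using hlen r (by simp [hr])
  have hr0pos : 0 < r0.length := List.length_pos_of_ne_nil hr0
  have hc2len : (cum 0 (r0.map (fun x => getCountA x 2))).length = r0.length := by
    simp [cum_length]
  have hAside : (r0 :: rest).foldl rowA ([] : List (Int × Int))
      = (rest.foldl (fun dp row => nextS dp (row.map (fun x => getCountA x 2)))
          (cum 0 (r0.map (fun x => getCountA x 2)))).zip
        (rest.foldl (fun dp row => nextS dp (row.map (fun x => getCountA x 5)))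
          (cum 0 (r0.map (fun x => getCountA x 5)))) := by
    simp only [List.foldl_cons]
    have h1 : rowA [] r0 = firstP r0 := by
      rw [rowA, if_pos rfl]; exact foldFirstA_entry r0 hr0
    rw [h1, firstP_zip]
    exact mainFold rest _ _ (by simp [cum_length])
      (List.ne_nil_of_length_pos (by omega))
      (by intro r hr; rw [hlen' r hr, ← hc2len])
  have hz2len : (rest.foldl (fun dp row => nextS dp (row.map (fun x => getCountA x 2)))
      (cum 0 (r0.map (fun x => getCountA x 2)))).length = r0.length := by
    rw [foldNextS_length _ _ _ (by intro r hr; rw [hlen' r hr, ← hc2len]), hc2len]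
  have hc5len : (cum 0 (r0.map (fun x => getCountA x 5))).length = r0.length := by
    simp [cum_length]
  have hz5len : (rest.foldl (fun dp row => nextS dp (row.map (fun x => getCountA x 5)))
      (cum 0 (r0.map (fun x => getCountA x 5)))).length = r0.length := by
    rw [foldNextS_length _ _ _ (by intro r hr; rw [hlen' r hr, ← hc5len]), hc5len]
  have hB2 : bestB (r0 :: rest) 2 = gSpec (r0 :: rest) 2 rest.length (r0.length - 1) := by
    rw [bestB_eq_gSpec]; simp
  have hB5 : bestB (r0 :: rest) 5 = gSpec (r0 :: rest) 5 rest.length (r0.length - 1) := by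
    rw [bestB_eq_gSpec]; simp
  unfold Spec_solution solution solution_alt
  dsimp only
  rw [hAside, zip_getLastD _ _ (by omega),
      foldScalar_last (r0 :: rest) 2 r0 rest rfl hr0 hlen',
      foldScalar_last (r0 :: rest) 5 r0 rest rfl hr0 hlen', hB2, hB5]
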